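-- pv_equiv track=rewrite | github.com/wraith-wireless/PyRIC | pyric/net/wireless/nl80211_c.py | _bandmarkers_
-- ===== SOURCE A (Python) =====
-- def _bandmarkers_(marker,bands):
--     ms = []
--     idx = 0
--     while idx < len(bands):
--         idx = bands.find(marker,idx)
--         if idx == -1: break
--         ms.append(idx)
--         idx += 2
--     return ms
-- ===== SOURCE B (Python) =====
-- def _bandmarkers_(marker, bands):
--     # Stage 1: precompute ALL occurrence positions of marker in bands.
--     occ = [i for i in range(len(bands)) if bands.startswith(marker, i)]
--     # Stage 2: replay the skip-2 cursor over the precomputed positions.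
--     ms = []
--     cur = 0
--     for p in occ:
--         if p >= cur:
--             ms.append(p)
--             cur = p + 2
--     return ms
-- ===== Notes on version B (the rewrite author's own statement) =====
-- stated objective: alternative
-- what changed: Replaces A's single find-driven cursor loop with two staged passes: first precompute the list of all occurrence positions of marker, then filter that list with the skip-2 cursor rule; str.find is never called.
import Mathlib
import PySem

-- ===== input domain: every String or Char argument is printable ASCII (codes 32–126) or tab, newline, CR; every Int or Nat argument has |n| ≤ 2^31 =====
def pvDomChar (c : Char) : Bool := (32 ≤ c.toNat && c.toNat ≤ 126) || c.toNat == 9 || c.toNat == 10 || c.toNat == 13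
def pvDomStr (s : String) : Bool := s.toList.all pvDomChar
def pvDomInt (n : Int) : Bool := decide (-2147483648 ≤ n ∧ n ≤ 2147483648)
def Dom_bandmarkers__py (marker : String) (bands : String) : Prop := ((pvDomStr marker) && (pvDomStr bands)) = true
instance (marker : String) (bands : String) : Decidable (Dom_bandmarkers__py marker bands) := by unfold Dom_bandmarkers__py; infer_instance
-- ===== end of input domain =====

-- B replaces A's find-driven cursor loop with two staged passes: precompute all
-- occurrence positions, then filter them with the skip-2 cursor rule (alternative, same cost).


-- ===== PORT A =====
-- A's while-loop: idx = bands.find(marker, idx); break on -1; append; idx += 2.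
-- idx is kept as a Nat (it is 0 or j+2 with j = find result ≥ 0, so always a Nat);
-- PySem.Chars.findFrom is exactly str.find(sub, start) on the code-point list.
def bmLoopA (marker bands : List Char) (idx : Nat) : List Int :=
  if h : idx < bands.length then
    if hj : PySem.Chars.findFrom bands marker (idx : Int) none = -1 then []
    else PySem.Chars.findFrom bands marker (idx : Int) none ::
      bmLoopA marker bands ((PySem.Chars.findFrom bands marker (idx : Int) none).toNat + 2)
  else []
termination_by bands.length - idx
decreasing_by
  have hk : idx ≤ bands.length := Nat.le_of_lt h
  have hge := (PySem.Chars.findFrom_natCast_spec bands marker idx hk hj).1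
  omega

def bandmarkers__py (marker : String) (bands : String) : List Int :=
  bmLoopA marker.toList bands.toList 0

-- ===== PORT B =====
-- Stage 1 of Source B: occ = [i for i in range(len(bands)) if bands.startswith(marker, i)].
-- bands.startswith(marker, i) for 0 ≤ i is exactly Chars.startswith (bands.drop i) marker.
def bmOcc (marker bands : List Char) : List Nat :=
  (List.range bands.length).filter (fun i => PySem.Chars.startswith (bands.drop i) marker)

-- Stage 2 of Source B: the for-loop over occ with cursor cur, appending p when p ≥ cur.
def bmFilter (occ : List Nat) (cur : Nat) : List Int :=
  match occ with
  | [] => []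
  | p :: rest => if cur ≤ p then (p : Int) :: bmFilter rest (p + 2) else bmFilter rest cur

def bandmarkers__py_alt (marker : String) (bands : String) : List Int :=
  bmFilter (bmOcc marker.toList bands.toList) 0

-- ===== PRECONDITION & SPEC =====
def Spec_bandmarkers__py (marker : String) (bands : String) (out : List Int) : Prop := out = bandmarkers__py_alt marker bands
instance (marker : String) (bands : String) (out : List Int) : Decidable (Spec_bandmarkers__py marker bands out) := by unfold Spec_bandmarkers__py; infer_instance

-- ===== CLAIM (what is proved, stated in full; the proofs are below) =====
def Claim_equal_bandmarkers__py : Prop := ∀ (marker : String) (bands : String), Dom_bandmarkers__py marker bands → Spec_bandmarkers__py marker bands (bandmarkers__py marker bands)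

-- ===== LEMMAS AND PROOFS =====

-- the occurrence positions at index ≥ k (proof-side view of bmOcc's suffix)
def bmOccGE (marker bands : List Char) (k : Nat) : List Nat :=
  (List.range' k (bands.length - k)).filter (fun i => PySem.Chars.startswith (bands.drop i) marker)

theorem bmOcc_eq_GE (marker bands : List Char) : bmOcc marker bands = bmOccGE marker bands 0 := by
  simp [bmOcc, bmOccGE, List.range_eq_range']

theorem bmOccGE_nil (marker bands : List Char) (k : Nat) (h : bands.length ≤ k) :
    bmOccGE marker bands k = [] := by
  simp [bmOccGE, Nat.sub_eq_zero_of_le h]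

theorem bmOccGE_peel (marker bands : List Char) (k : Nat) (h : k < bands.length) :
    bmOccGE marker bands k =
      (if marker <+: bands.drop k then [k] else []) ++ bmOccGE marker bands (k + 1) := by
  unfold bmOccGE
  have e : bands.length - k = (bands.length - (k + 1)) + 1 := by omega
  rw [e, List.range'_succ, List.filter_cons]
  by_cases hp : marker <+: bands.drop k
  · rw [if_pos ((PySem.Chars.startswith_iff _ _).mpr hp), if_pos hp]; rfl
  · rw [if_neg (fun hc => hp ((PySem.Chars.startswith_iff _ _).mp hc)), if_neg hp]; rfl

-- infix of a drop ↔ prefix at some position ≥ k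
theorem infix_drop_iff (marker bands : List Char) (k : Nat) :
    marker <:+: bands.drop k ↔ ∃ j, k ≤ j ∧ marker <+: bands.drop j := by
  rw [← PySem.Chars.isIn_iff_infix, ← PySem.Chars.exists_prefix_drop_iff_isIn]
  constructor
  · rintro ⟨j, hj⟩
    rw [List.drop_drop] at hj
    exact ⟨k + j, by omega, hj⟩
  · rintro ⟨j, hkj, hj⟩
    refine ⟨j - k, ?_⟩
    rw [List.drop_drop]
    have e : k + (j - k) = j := by omega
    rw [e]; exact hj

-- skipping a match-free stretch leaves the occurrence suffix unchanged
theorem bmOccGE_skip (marker bands : List Char) :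
    ∀ d k, (∀ t, k ≤ t → t < k + d → ¬ marker <+: bands.drop t) →
      bmOccGE marker bands k = bmOccGE marker bands (k + d) := by
  intro d
  induction d with
  | zero => intro k _; rfl
  | succ d ih =>
    intro k hno
    by_cases h : k < bands.length
    · rw [bmOccGE_peel marker bands k h, if_neg (hno k (le_refl k) (by omega)), List.nil_append]
      have := ih (k + 1) (fun t ht1 ht2 => hno t (by omega) (by omega))
      rw [this]
      congr 1
      omega
    · rw [bmOccGE_nil marker bands k (by omega), bmOccGE_nil marker bands (k + (d+1)) (by omega)]

-- the main simulation lemma: A's loop from k equals B's filter over occurrences ≥ k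
theorem bmLoop_eq_filter (marker bands : List Char) :
    ∀ fuel k, bands.length - k ≤ fuel →
      bmLoopA marker bands k = bmFilter (bmOccGE marker bands k) k := by
  intro fuel
  induction fuel with
  | zero =>
    intro k hk
    rw [bmLoopA, dif_neg (by omega : ¬ k < bands.length),
      bmOccGE_nil marker bands k (by omega)]
    rfl
  | succ fuel ih =>
    intro k hk
    by_cases h : k < bands.length
    · have hkle : k ≤ bands.length := Nat.le_of_lt h
      by_cases hne : PySem.Chars.findFrom bands marker (k : Int) none = -1
      · -- no occurrence at or after k: both sides empty
        have hno : ¬ marker <:+: bands.drop k :=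
          (PySem.Chars.findFrom_natCast_eq_neg_one_iff bands marker k hkle).mp hne
        have hnil : bmOccGE marker bands k = [] := by
          rw [bmOccGE_skip marker bands (bands.length - k) k
            (fun t ht1 ht2 => fun hp =>
              hno ((infix_drop_iff marker bands k).mpr ⟨t, ht1, hp⟩))]
          exact bmOccGE_nil marker bands _ (by omega)
        rw [bmLoopA, dif_pos h, dif_pos hne, hnil]
        rfl
      · obtain ⟨hge, hpre, hmin⟩ := PySem.Chars.findFrom_natCast_spec bands marker k hkle hne
        set j := PySem.Chars.findFrom bands marker (k : Int) none with hjdef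
        have hj0 : (0:Int) ≤ j := le_trans (by exact_mod_cast Nat.zero_le k) hge
        have hjk : k ≤ j.toNat := by omega
        -- j.toNat < bands.length (nonempty marker fits; empty marker gives j = k)
        have hjlt : j.toNat < bands.length := by
          by_cases hm : marker = []
          · have : j.toNat = k := by
              by_contra hc
              exact hmin k (le_refl k) (by omega) (hm ▸ List.nil_prefix)
            omega
          · have hlen := hpre.length_le
            have hmp : 0 < marker.length := List.length_pos_iff.mpr hm
            rw [List.length_drop] at hlen
            omega
        -- occurrences ≥ k = j.toNat :: occurrences ≥ j.toNat+1
        have hskip : bmOccGE marker bands k = bmOccGE marker bands j.toNat := by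
          have := bmOccGE_skip marker bands (j.toNat - k) k
            (fun t ht1 ht2 => hmin t ht1 (by omega))
          rw [this]; congr 1; omega
        have hpeel : bmOccGE marker bands j.toNat = j.toNat :: bmOccGE marker bands (j.toNat + 1) := by
          rw [bmOccGE_peel marker bands j.toNat hjlt, if_pos hpre]; rfl
        -- occurrences ≥ j.toNat+1 filtered at cursor j.toNat+2 = occurrences ≥ j.toNat+2 filtered there
        have hmid : bmFilter (bmOccGE marker bands (j.toNat + 1)) (j.toNat + 2)
            = bmFilter (bmOccGE marker bands (j.toNat + 2)) (j.toNat + 2) := by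
          by_cases h1 : j.toNat + 1 < bands.length
          · rw [bmOccGE_peel marker bands (j.toNat + 1) h1]
            by_cases hp1 : marker <+: bands.drop (j.toNat + 1)
            · rw [if_pos hp1]
              show bmFilter ((j.toNat + 1) :: _) _ = _
              simp only [bmFilter, if_neg (by omega : ¬ j.toNat + 2 ≤ j.toNat + 1)]
              have e2 : j.toNat + 1 + 1 = j.toNat + 2 := by omega
              rw [e2]
              rfl
            · rw [if_neg hp1, List.nil_append]
          · rw [bmOccGE_nil marker bands (j.toNat + 1) (by omega),
              bmOccGE_nil marker bands (j.toNat + 2) (by omega)]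
        have hcast : (j.toNat : Int) = j := by omega
        rw [bmLoopA, dif_pos h, dif_neg hne, hskip, hpeel]
        simp only [bmFilter, if_pos hjk]
        rw [hmid, ih (j.toNat + 2) (by omega), hcast]
    · rw [bmLoopA, dif_neg h, bmOccGE_nil marker bands k (by omega)]
      rfl

-- ===== VERDICT (by name: the statement is the Claim_ definition above) =====
theorem bandmarkers__py_spec : Claim_equal_bandmarkers__py := by
  intro marker bands _
  unfold Spec_bandmarkers__py bandmarkers__py bandmarkers__py_alt
  rw [bmOcc_eq_GE]
  exact bmLoop_eq_filter marker.toList bands.toList bands.toList.length 0 (by omega)
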